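-- pv_equiv track=rewrite | github.com/puraminy/nodcast | nodcast/nodcast.py | find
-- ===== SOURCE A (Python) =====
-- def find(list, st, ch, default):
--     _find = st + ch
--     _find = _find.lower().strip()
--     for i, item in enumerate(list):
--         if item.lower().startswith(_find): #or _find in item.lower() or item.lower() in _find:
--             return i, _find
--     for i, item in enumerate(list):
--         if _find in item.lower():
--             return i, _find
--     return default, st
-- ===== SOURCE B (Python) =====
-- def find(list, st, ch, default):
--     _find = (st + ch).lower().strip()
--     cand = None
--     for i, item in enumerate(list):
--         low = item.lower()
--         if low.startswith(_find):
--             return i, _find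
--         if cand is None and _find in low:
--             cand = i
--     if cand is not None:
--         return cand, _find
--     return default, st
-- ===== Notes on version B (the rewrite author's own statement) =====
-- stated objective: simpler
-- what changed: Single pass that returns immediately on a prefix match and records only the first substring match as a fallback, instead of A's two full scans (each re-lowercasing every item).
import Mathlib
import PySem

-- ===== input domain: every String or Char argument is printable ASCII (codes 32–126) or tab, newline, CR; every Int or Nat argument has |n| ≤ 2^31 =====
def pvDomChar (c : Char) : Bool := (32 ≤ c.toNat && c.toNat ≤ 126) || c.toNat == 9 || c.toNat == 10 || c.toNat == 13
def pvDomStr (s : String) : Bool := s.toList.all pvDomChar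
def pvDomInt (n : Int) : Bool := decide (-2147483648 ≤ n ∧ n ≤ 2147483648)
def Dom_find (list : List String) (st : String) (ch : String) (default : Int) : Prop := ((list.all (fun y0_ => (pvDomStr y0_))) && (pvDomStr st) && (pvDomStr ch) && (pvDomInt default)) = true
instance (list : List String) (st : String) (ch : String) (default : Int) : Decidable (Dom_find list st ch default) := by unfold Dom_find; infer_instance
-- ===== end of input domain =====

-- B is a single pass: return on a prefix match, record the first substring match as fallback;
-- A makes two full scans. Same value everywhere (total); equivalence proved below.

-- ===== PORT A =====
-- first loop: return (i, _find) on the first item whose lower() starts with _find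
def findLoop1 : List String → Int → String → Option (Int × String)
  | [], _, _ => none
  | x :: xs, i, f =>
      if PySem.Str.startswith (PySem.Str.lower x) f then some (i, f)
      else findLoop1 xs (i + 1) f

-- second loop: return (i, _find) on the first item whose lower() contains _find
def findLoop2 : List String → Int → String → Option (Int × String)
  | [], _, _ => none
  | x :: xs, i, f =>
      if PySem.Str.isIn f (PySem.Str.lower x) then some (i, f)
      else findLoop2 xs (i + 1) f

def find (list : List String) (st : String) (ch : String) (default : Int) : Int × String :=
  let f := PySem.Str.strip (PySem.Str.lower (st ++ ch))
  match findLoop1 list 0 f with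
  | some r => r
  | none =>
    match findLoop2 list 0 f with
    | some r => r
    | none => (default, st)

-- ===== PORT B =====
-- single pass with a fallback candidate (cand = first substring-only match so far)
def findAltLoop : List String → Int → String → Option Int → String → Int → Int × String
  | [], _, f, cand, st, default =>
      match cand with
      | some c => (c, f)
      | none => (default, st)
  | x :: xs, i, f, cand, st, default =>
      let low := PySem.Str.lower x
      if PySem.Str.startswith low f then (i, f)
      else findAltLoop xs (i + 1) f
        (if cand.isNone && PySem.Str.isIn f low then some i else cand) st default

def find_alt (list : List String) (st : String) (ch : String) (default : Int) : Int × String :=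
  let f := PySem.Str.strip (PySem.Str.lower (st ++ ch))
  findAltLoop list 0 f none st default

-- ===== PRECONDITION & SPEC =====
def Spec_find (list : List String) (st : String) (ch : String) (default : Int) (out : Int × String) : Prop := out = find_alt list st ch default
instance (list : List String) (st : String) (ch : String) (default : Int) (out : Int × String) : Decidable (Spec_find list st ch default out) := by unfold Spec_find; infer_instance

-- ===== CLAIM (what is proved, stated in full; the proofs are below) =====
def Claim_equal_find : Prop := ∀ (list : List String) (st : String) (ch : String) (default : Int), Dom_find list st ch default → Spec_find list st ch default (find list st ch default)

-- ===== LEMMAS AND PROOFS =====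

-- invariant of B's single pass: a prefix match in the rest wins; otherwise a recorded
-- candidate wins; otherwise A's second loop over the rest decides; else the default
theorem findAltLoop_eq (xs : List String) : ∀ (i : Int) (f : String) (cand : Option Int)
    (st : String) (default : Int),
    findAltLoop xs i f cand st default =
      match findLoop1 xs i f with
      | some r => r
      | none =>
        match cand with
        | some c => (c, f)
        | none =>
          match findLoop2 xs i f with
          | some r => r
          | none => (default, st) := by
  induction xs with
  | nil => intro i f cand st default; cases cand <;> rfl
  | cons x xs ih =>
    intro i f cand st default
    simp only [findAltLoop, findLoop1, findLoop2, ih]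
    by_cases hsw : PySem.Str.startswith (PySem.Str.lower x) f = true
    · rw [if_pos hsw, if_pos hsw]
    · rw [if_neg hsw, if_neg hsw]
      cases cand with
      | some c => rfl
      | none =>
        simp only [Option.isNone_none, Bool.true_and]
        by_cases hin : PySem.Str.isIn f (PySem.Str.lower x) = true
        · rw [if_pos hin, if_pos hin]
        · rw [if_neg hin, if_neg hin]

-- ===== VERDICT (by name: the statement is the Claim_ definition above) =====
theorem find_spec : Claim_equal_find := by
  intro list st ch default _
  unfold Spec_find find find_alt
  rw [findAltLoop_eq]
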